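-- pv_equiv track=rewrite | github.com/JonathanDaboush/webScraperFeature.py | webScraper/backend/Crawler/http_client.py | is_captcha
-- ===== SOURCE A (Python) =====
-- def is_captcha(body: str) -> bool:
--     """Check if page looks like a captcha."""
--     captcha_markers = [
--         "verify you are human",
--         "recaptcha",
--         "captcha",
--         "cloudflare",
--         "please complete the security check",
--         "access denied",
--         "are you a robot",
--         "bot detection"
--     ]
--
--     body_lower = body.lower()
--     for marker in captcha_markers:
--         if marker in body_lower:
--             return True
--
--     # recaptcha iframe is a dead giveaway
--     if 'google.com/recaptcha' in body_lower:
--         return True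
--
--     return False
-- ===== SOURCE B (Python) =====
-- import re
--
-- _CAPTCHA_RE = re.compile("|".join(map(re.escape, [
--     "verify you are human",
--     "recaptcha",
--     "captcha",
--     "cloudflare",
--     "please complete the security check",
--     "access denied",
--     "are you a robot",
--     "bot detection",
--     "google.com/recaptcha",
-- ])))
--
--
-- def is_captcha(body: str) -> bool:
--     """Check if page looks like a captcha."""
--     return bool(_CAPTCHA_RE.search(body.lower()))
-- ===== Notes on version B (the rewrite author's own statement) =====
-- stated objective: idiomatic
-- what changed: B compiles one regex alternation of the escaped markers (including google.com/recaptcha) and decides with a single pattern search over the lower-cased body, instead of A's marker-by-marker loop of substring tests plus a separate trailing check.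
import Mathlib
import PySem

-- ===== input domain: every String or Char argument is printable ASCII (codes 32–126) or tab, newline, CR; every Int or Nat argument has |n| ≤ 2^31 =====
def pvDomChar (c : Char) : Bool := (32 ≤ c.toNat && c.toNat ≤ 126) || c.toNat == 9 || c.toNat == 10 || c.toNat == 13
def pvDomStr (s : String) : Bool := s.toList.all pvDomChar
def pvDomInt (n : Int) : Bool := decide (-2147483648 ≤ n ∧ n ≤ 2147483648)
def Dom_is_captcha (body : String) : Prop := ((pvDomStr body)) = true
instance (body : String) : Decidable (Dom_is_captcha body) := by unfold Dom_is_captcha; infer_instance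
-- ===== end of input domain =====

-- B replaces A's marker-by-marker loop (plus a separate trailing check) by one regex
-- alternation of the escaped literal markers searched once over the lower-cased body.

-- ===== PORT A =====
def pvMarkersA : List String :=
  ["verify you are human", "recaptcha", "captcha", "cloudflare",
   "please complete the security check", "access denied",
   "are you a robot", "bot detection"]

-- A's for-loop with early return, then the separate google.com/recaptcha check
def pvLoopA (markers : List String) (bodyLower : String) : Bool :=
  match markers with
  | [] =>
    if PySem.Str.isIn "google.com/recaptcha" bodyLower then true else false
  | m :: ms =>
    if PySem.Str.isIn m bodyLower then true else pvLoopA ms bodyLower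

def is_captcha (body : String) : Bool :=
  pvLoopA pvMarkersA (PySem.Str.lower body)

-- ===== PORT B =====
-- B's compiled pattern: the alternation of the nine escaped literal markers
def pvAltsB : List (List Char) :=
  ["verify you are human".toList, "recaptcha".toList, "captcha".toList,
   "cloudflare".toList, "please complete the security check".toList,
   "access denied".toList, "are you a robot".toList, "bot detection".toList,
   "google.com/recaptcha".toList]

-- bool(pattern.search(s)) for an alternation of escaped LITERALS: the search
-- succeeds iff some alternative occurs as a substring of s (exact for literals)
-- substring occurrence test (a occurs in s), used by the search
def pvInfix (a : List Char) : List Char → Bool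
  | [] => a.isEmpty
  | c :: cs => a.isPrefixOf (c :: cs) || pvInfix a cs

def pvSearchB (alts : List (List Char)) (s : List Char) : Bool :=
  alts.any (fun a => pvInfix a s)

def is_captcha_alt (body : String) : Bool :=
  pvSearchB pvAltsB (PySem.Chars.lower body.toList)

-- ===== PRECONDITION & SPEC =====
def Spec_is_captcha (body : String) (out : Bool) : Prop := out = is_captcha_alt body
instance (body : String) (out : Bool) : Decidable (Spec_is_captcha body out) := by unfold Spec_is_captcha; infer_instance

-- ===== CLAIM (what is proved, stated in full; the proofs are below) =====
def Claim_equal_is_captcha : Prop := ∀ (body : String), Dom_is_captcha body → Spec_is_captcha body (is_captcha body)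

-- ===== LEMMAS AND PROOFS =====

theorem pvInfix_iff (a s : List Char) : pvInfix a s = true ↔ a <:+: s := by
  induction s with
  | nil => simp [pvInfix, List.isEmpty_iff, List.infix_nil]
  | cons c cs ih =>
    simp [pvInfix, List.isPrefixOf_iff_prefix, ih, List.infix_cons_iff]

theorem pvSearchB_iff (alts : List (List Char)) (s : List Char) :
    pvSearchB alts s = true ↔ ∃ a ∈ alts, a <:+: s := by
  simp [pvSearchB, List.any_eq_true, pvInfix_iff]

theorem pvLoopA_iff (ms : List String) (bl : String) :
    pvLoopA ms bl = true ↔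
      (∃ m ∈ ms, m.toList <:+: bl.toList) ∨
        "google.com/recaptcha".toList <:+: bl.toList := by
  induction ms with
  | nil => simp [pvLoopA, PySem.Chars.isIn_iff_infix]
  | cons m ms ih =>
    cases hb : PySem.Str.isIn m bl with
    | true =>
      have hin := (PySem.Str.isIn_iff_infix m bl).mp hb
      simp only [pvLoopA, hb, if_true, true_iff]
      exact Or.inl ⟨m, List.mem_cons_self, hin⟩
    | false =>
      have hnin : ¬ m.toList <:+: bl.toList := fun hc => by
        rw [(PySem.Str.isIn_iff_infix m bl).mpr hc] at hb; cases hb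
      simp only [pvLoopA, hb, Bool.false_eq_true, if_false, ih]
      constructor
      · rintro (⟨x, hx, hi⟩ | hg)
        · exact Or.inl ⟨x, List.mem_cons_of_mem _ hx, hi⟩
        · exact Or.inr hg
      · rintro (⟨x, hx, hi⟩ | hg)
        · rcases List.mem_cons.mp hx with rfl | hx'
          · exact absurd hi hnin
          · exact Or.inl ⟨x, hx', hi⟩
        · exact Or.inr hg

-- ===== VERDICT (by name: the statement is the Claim_ definition above) =====
theorem is_captcha_spec : Claim_equal_is_captcha := by
  intro body _
  unfold Spec_is_captcha
  have hbl : (PySem.Str.lower body).toList = PySem.Chars.lower body.toList := by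
    simp [PySem.Str.toList_lower]
  apply Bool.eq_iff_iff.mpr
  rw [is_captcha, is_captcha_alt, pvLoopA_iff, pvSearchB_iff, hbl]
  simp only [pvMarkersA, pvAltsB, List.mem_cons, List.not_mem_nil, or_false]
  constructor
  · rintro (⟨m, hm, hi⟩ | hg)
    · rcases hm with rfl | rfl | rfl | rfl | rfl | rfl | rfl | rfl <;>
        exact ⟨_, by simp, hi⟩
    · exact ⟨_, by simp, hg⟩
  · rintro ⟨a, ha, hi⟩
    rcases ha with rfl | rfl | rfl | rfl | rfl | rfl | rfl | rfl | rfl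
    · exact Or.inl ⟨_, by simp, hi⟩
    · exact Or.inl ⟨_, by simp, hi⟩
    · exact Or.inl ⟨_, by simp, hi⟩
    · exact Or.inl ⟨_, by simp, hi⟩
    · exact Or.inl ⟨_, by simp, hi⟩
    · exact Or.inl ⟨_, by simp, hi⟩
    · exact Or.inl ⟨_, by simp, hi⟩
    · exact Or.inl ⟨_, by simp, hi⟩
    · exact Or.inr hi
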